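-- pv_equiv track=rewrite | github.com/kur114/lib-mgmt | lib_mgmt/utils/upload_validator.py | reader_validate
-- ===== SOURCE A (Python) =====
-- def reader_validate(file_data):
--     try:
--         lines = file_data.split("\n")
--         for line in lines:
--             # 检查每一行是否有 7 个字段
--             # 检查字段属性和长度是否符合要求
--             # 不符合返回 (False,reason)
--             fields = line.split(",")
--             if len(fields) != 7:
--                 return (False, "Invalid number of fields")
--             username = fields[0]
--             first_name = fields[1]
--             last_name = fields[2]
--             email = fields[3]
--             password = fields[4]
--             is_staff = fields[5]
--             max_borrow_limit = fields[6]
--             if len(username) > 20: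
--                 return (False, "Username too long")
--             if len(first_name) > 30:
--                 return (False, "First name too long")
--             if len(last_name) > 30:
--                 return (False, "Last name too long")
--             if len(email) > 100:
--                 return (False, "Email too long")
--             if len(password) > 25:
--                 return (False, "Password too long")
--             if len(is_staff) > 1:
--                 return (False, "Is staff too long")
--             if len(max_borrow_limit) > 10:
--                 return (False, "Max borrow limit too long")
--     except Exception as e:
--         return (False, str(e))
--     return (True, "good")
-- ===== SOURCE B (Python) =====
-- # Streaming validator: one pass over the characters, tracking only the
-- # lengths of the fields of the current line; no split(), no substrings.
-- LIMITS = [(20, "Username too long"), (30, "First name too long"),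
--           (30, "Last name too long"), (100, "Email too long"),
--           (25, "Password too long"), (1, "Is staff too long"),
--           (10, "Max borrow limit too long")]
--
--
-- def _check_line(lens):
--     # lens: the field lengths of one line; first violated rule's message, else None
--     if len(lens) != 7:
--         return "Invalid number of fields"
--     for n, (limit, msg) in zip(lens, LIMITS):
--         if n > limit:
--             return msg
--     return None
--
--
-- def reader_validate(file_data):
--     try:
--         done = []   # lengths of the completed fields of the current line
--         cur = 0     # length of the field being scanned
--         for ch in file_data:
--             if ch == ',':
--                 done.append(cur)
--                 cur = 0
--             elif ch == '\n':
--                 err = _check_line(done + [cur])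
--                 if err is not None:
--                     return (False, err)
--                 done = []
--                 cur = 0
--             else:
--                 cur += 1
--         err = _check_line(done + [cur])
--         if err is not None:
--             return (False, err)
--     except Exception as e:
--         return (False, str(e))
--     return (True, "good")
-- ===== Notes on version B (the rewrite author's own statement) =====
-- stated objective: alternative
-- what changed: A splits the text on newlines, splits each line on commas and runs seven unrolled length checks on the field substrings; B is a single character-level scan that builds no substrings at all, tracking only the lengths of the current line's fields and checking them against a limits table at each line end.
import Mathlib
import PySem

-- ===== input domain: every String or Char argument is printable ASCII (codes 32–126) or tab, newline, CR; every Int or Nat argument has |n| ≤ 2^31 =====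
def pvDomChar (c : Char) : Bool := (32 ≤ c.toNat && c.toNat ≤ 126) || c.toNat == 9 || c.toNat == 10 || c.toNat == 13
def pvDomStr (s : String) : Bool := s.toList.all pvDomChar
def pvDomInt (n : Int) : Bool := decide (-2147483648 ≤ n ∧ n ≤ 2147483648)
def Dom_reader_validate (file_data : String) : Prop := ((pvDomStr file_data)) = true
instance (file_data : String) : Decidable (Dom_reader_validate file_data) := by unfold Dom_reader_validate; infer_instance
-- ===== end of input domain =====

-- B replaces A's split-twice approach (split on '\n', each line on ',', seven unrolled length
-- checks on the field substrings) by a single character-level scan that never builds substrings: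
-- it tracks only the lengths of the current line's fields and checks them against a limits
-- table at each newline (objective: alternative).
-- A's try/except can never fire on a String input, so both ports are total and no Pre_ is needed.

-- ===== PORT A =====
-- per-line body of A's for-loop; falls through to the next line when all checks pass
def pvLoopA : List String → Bool × String
  | [] => (true, "good")
  | line :: rest =>
    let fields := (PySem.Str.split? line ",").getD []
    if fields.length ≠ 7 then (false, "Invalid number of fields")
    else
      let username := (PySem.List.pyGet? fields 0).getD ""
      let first_name := (PySem.List.pyGet? fields 1).getD ""
      let last_name := (PySem.List.pyGet? fields 2).getD ""
      let email := (PySem.List.pyGet? fields 3).getD ""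
      let password := (PySem.List.pyGet? fields 4).getD ""
      let is_staff := (PySem.List.pyGet? fields 5).getD ""
      let max_borrow_limit := (PySem.List.pyGet? fields 6).getD ""
      if PySem.Str.len username > 20 then (false, "Username too long")
      else if PySem.Str.len first_name > 30 then (false, "First name too long")
      else if PySem.Str.len last_name > 30 then (false, "Last name too long")
      else if PySem.Str.len email > 100 then (false, "Email too long")
      else if PySem.Str.len password > 25 then (false, "Password too long")
      else if PySem.Str.len is_staff > 1 then (false, "Is staff too long")
      else if PySem.Str.len max_borrow_limit > 10 then (false, "Max borrow limit too long")
      else pvLoopA rest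

def reader_validate (file_data : String) : Bool × String :=
  pvLoopA ((PySem.Str.split? file_data "\n").getD [])

-- ===== PORT B =====
-- LIMITS table of Source B
def pvLimits : List (Int × String) :=
  [(20, "Username too long"), (30, "First name too long"),
   (30, "Last name too long"), (100, "Email too long"),
   (25, "Password too long"), (1, "Is staff too long"),
   (10, "Max borrow limit too long")]

-- the 'for n, (limit, msg) in zip(lens, LIMITS)' loop of _check_line
def pvFirstViol : List (Int × Int × String) → Option String
  | [] => none
  | (n, limit, msg) :: rest => if n > limit then some msg else pvFirstViol rest

-- _check_line of Source B: field lengths of one line → first violated rule's message, if any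
def pvCheckLine (lens : List Int) : Option String :=
  if lens.length ≠ 7 then some "Invalid number of fields"
  else pvFirstViol (lens.zip pvLimits)

-- the character scan of Source B: done = lengths of the completed fields of the current line,
-- cur = length of the field being scanned
def pvScanB : List Char → List Int → Int → Bool × String
  | [], done, cur =>
    match pvCheckLine (done ++ [cur]) with
    | some e => (false, e)
    | none => (true, "good")
  | ch :: cs, done, cur =>
    if ch = ',' then pvScanB cs (done ++ [cur]) 0
    else if ch = '\n' then
      match pvCheckLine (done ++ [cur]) with
      | some e => (false, e)
      | none => pvScanB cs [] 0
    else pvScanB cs done (cur + 1)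

def reader_validate_alt (file_data : String) : Bool × String :=
  pvScanB file_data.toList [] 0

-- ===== PRECONDITION & SPEC =====
def Spec_reader_validate (file_data : String) (out : Bool × String) : Prop := out = reader_validate_alt file_data
instance (file_data : String) (out : Bool × String) : Decidable (Spec_reader_validate file_data out) := by unfold Spec_reader_validate; infer_instance

-- ===== CLAIM (what is proved, stated in full; the proofs are below) =====
def Claim_equal_reader_validate : Prop := ∀ (file_data : String), Dom_reader_validate file_data → Spec_reader_validate file_data (reader_validate file_data)

-- ===== LEMMAS AND PROOFS =====

-- split on a single separator char, with the (always present) first piece kept separate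
def pvSplitC (c : Char) : List Char → List Char × List (List Char)
  | [] => ([], [])
  | x :: xs =>
    let p := pvSplitC c xs
    if x = c then ([], p.1 :: p.2) else (x :: p.1, p.2)

theorem pvSplitC_cons_self (c : Char) (xs : List Char) :
    pvSplitC c (c :: xs) = ([], (pvSplitC c xs).1 :: (pvSplitC c xs).2) := by
  simp [pvSplitC]

theorem pvSplitC_cons_ne (c x : Char) (xs : List Char) (h : x ≠ c) :
    pvSplitC c (x :: xs) = (x :: (pvSplitC c xs).1, (pvSplitC c xs).2) := by
  simp [pvSplitC, h]

theorem pv_go_single (c : Char) (l : List Char) : ∀ (fuel : Nat) (cur : List Char) (acc : List (List Char)),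
    l.length < fuel →
    PySem.Chars.splitOn.go [c] fuel l cur acc
      = acc.reverse ++ ((cur.reverse ++ (pvSplitC c l).1) :: (pvSplitC c l).2) := by
  induction l with
  | nil =>
    intro fuel cur acc h
    match fuel with
    | fuel+1 => simp [PySem.Chars.splitOn.go, pvSplitC]
  | cons x xs ih =>
    intro fuel cur acc h
    match fuel with
    | fuel+1 =>
      rw [PySem.Chars.splitOn.go]
      by_cases hx : x = c
      · simp only [hx, List.isPrefixOf, beq_self_eq_true, Bool.true_and, if_true]
        simp only [List.length_cons, List.drop_succ_cons, List.drop_zero, List.length_nil]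
        rw [ih fuel [] (cur.reverse :: acc) (by simpa using h)]
        simp [pvSplitC]
      · have hp : ([c].isPrefixOf (x :: xs)) = false := by
          simp [List.isPrefixOf]
          exact fun hc => hx hc.symm
        simp only [hp, Bool.false_eq_true, not_false_eq_true, if_neg]
        rw [ih fuel (x :: cur) acc (by simpa using Nat.lt_of_succ_lt_succ h)]
        simp [pvSplitC, hx]

theorem pv_splitOn_single (c : Char) (l : List Char) :
    PySem.Chars.splitOn l [c] = (pvSplitC c l).1 :: (pvSplitC c l).2 := by
  rw [PySem.Chars.splitOn, pv_go_single c l (l.length+1) [] [] (by omega)]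
  simp

-- the field-length list of one line (as B sees it)
def pvLineLens (l : List Char) : List Int :=
  ((pvSplitC ',' l).1.length : Int) :: (pvSplitC ',' l).2.map (fun f => (f.length : Int))

-- common evaluation both ports reduce to: check each line's field lengths in order
def pvCheckLines : List (List Int) → Bool × String
  | [] => (true, "good")
  | l :: rest =>
    match pvCheckLine l with
    | some m => (false, m)
    | none => pvCheckLines rest

-- A's split-and-check loop computes pvCheckLines of the field lengths
set_option maxHeartbeats 1000000 in
theorem pvLoopA_eq_checkLines (L : List (List Char)) :
    pvLoopA (L.map String.ofList) = pvCheckLines (L.map pvLineLens) := by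
  induction L with
  | nil => rfl
  | cons line rest ih =>
    rw [List.map_cons, List.map_cons, pvLoopA, pvCheckLines]
    have hsplit : (PySem.Str.split? (String.ofList line) ",").getD []
        = String.ofList (pvSplitC ',' line).1 :: ((pvSplitC ',' line).2.map String.ofList) := by
      simp [PySem.Str.split?, PySem.Chars.split?, pv_splitOn_single]
    simp only [hsplit]
    rw [ih]
    rcases hF : (pvSplitC ',' line).2 with _ | ⟨f1, _ | ⟨f2, _ | ⟨f3, _ | ⟨f4, _ | ⟨f5, _ | ⟨f6, _ | ⟨f7, t⟩⟩⟩⟩⟩⟩⟩ <;>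
      simp only [pvLineLens, hF] <;>
      first
      | -- field count ≠ 7: both sides report the count error
        (simp [pvCheckLine]; done)
      | -- exactly 7 fields: unfold both check chains and compare branch by branch
        (simp only [List.map_cons, List.map_nil, PySem.List.pyGet?, PySem.List.pyIdx?]
         norm_num [pvCheckLine, PySem.Str.len, PySem.Chars.len]
         simp only [pvLimits, List.zip_cons_cons, List.zip_nil_right, pvFirstViol]
         split_ifs <;> simp_all <;> omega)

-- B's scan computes the same pvCheckLines, with the current line's partial lengths carried along
theorem pvScanB_eq (cs : List Char) : ∀ (done : List Int) (cur : Int),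
    pvScanB cs done cur
      = pvCheckLines ((done ++ (cur + ((pvSplitC ',' (pvSplitC '\n' cs).1).1.length : Int))
            :: (pvSplitC ',' (pvSplitC '\n' cs).1).2.map (fun f => (f.length : Int)))
          :: (pvSplitC '\n' cs).2.map pvLineLens) := by
  induction cs with
  | nil => intro done cur; simp [pvScanB, pvSplitC, pvCheckLines]
  | cons ch cs ih =>
    intro done cur
    rw [pvScanB]
    by_cases hc : ch = ','
    · subst hc
      rw [if_pos rfl, ih, pvSplitC_cons_ne '\n' ',' cs (by decide), pvSplitC_cons_self]
      simp
    · rw [if_neg hc]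
      by_cases hn : ch = '\n'
      · subst hn
        rw [if_pos rfl, pvSplitC_cons_self]
        simp only [pvSplitC, List.length_nil, Nat.cast_zero, add_zero, List.map_nil,
          List.map_cons, pvCheckLines, pvLineLens]
        cases h : pvCheckLine (done ++ [cur]) with
        | some m => simp
        | none => rw [ih, pvCheckLines]; simp
      · rw [if_neg hn, ih, pvSplitC_cons_ne '\n' ch cs hn,
            pvSplitC_cons_ne ',' ch _ hc]
        simp only [List.length_cons]
        push_cast
        ring_nf

-- ===== VERDICT (by name: the statement is the Claim_ definition above) =====
theorem reader_validate_spec : Claim_equal_reader_validate := by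
  intro fd _
  unfold Spec_reader_validate reader_validate reader_validate_alt
  have hsplit : (PySem.Str.split? fd "\n").getD []
      = ((pvSplitC '\n' fd.toList).1 :: (pvSplitC '\n' fd.toList).2).map String.ofList := by
    simp [PySem.Str.split?, PySem.Chars.split?, pv_splitOn_single]
  rw [hsplit, pvLoopA_eq_checkLines, pvScanB_eq]
  simp [pvLineLens]
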